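-- pv_equiv track=rewrite | github.com/RomanToropkin/math | DefaultSymplex.py | _find_permitting_column
-- ===== SOURCE A (Python) =====
-- def _find_permitting_column(row):
--     mini = 0
--     min_index = -1
--     for i in range(0, len(row)):
--         if row[i] < mini:
--             min_index = i
--             mini = row[i]
--     return min_index
-- ===== SOURCE B (Python) =====
-- def _find_permitting_column(row):
--     order = sorted(range(len(row)), key=lambda i: row[i])
--     if order and row[order[0]] < 0:
--         return order[0]
--     return -1
-- ===== Notes on version B (the rewrite author's own statement) =====
-- stated objective: alternative
-- what changed: Replaced the fused running-minimum index scan with a sort of the index list by value (stable, so ties keep the first index) followed by a check of the leading index against zero.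
import Mathlib
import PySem

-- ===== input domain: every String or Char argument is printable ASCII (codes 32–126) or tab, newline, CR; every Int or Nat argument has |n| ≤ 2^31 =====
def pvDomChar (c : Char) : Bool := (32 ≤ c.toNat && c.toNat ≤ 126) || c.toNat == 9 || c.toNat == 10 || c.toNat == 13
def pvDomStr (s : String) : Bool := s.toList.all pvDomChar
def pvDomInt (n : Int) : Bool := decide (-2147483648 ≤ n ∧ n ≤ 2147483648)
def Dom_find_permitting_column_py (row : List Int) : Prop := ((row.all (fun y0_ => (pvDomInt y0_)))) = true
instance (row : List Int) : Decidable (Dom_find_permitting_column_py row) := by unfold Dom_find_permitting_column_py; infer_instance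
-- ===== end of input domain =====

-- B replaces A's fused running-minimum index scan by a stable sort of the index list by
-- value followed by a check of the leading index (objective: alternative algorithm).


-- ===== PORT A =====
def find_permitting_column_py (row : List Int) : Int :=
  ((PySem.List.pyRange 0 (PySem.List.len row) 1).foldl
    (fun (st : Int × Int) (i : Int) =>
      if PySem.List.pyGetD row i 0 < st.1 then (PySem.List.pyGetD row i 0, i) else st)
    (0, -1)).2

-- ===== PORT B =====
def find_permitting_column_py_alt (row : List Int) : Int :=
  let order := PySem.List.sorted (PySem.List.pyRange 0 (PySem.List.len row) 1)
                 (fun i => PySem.List.pyGetD row i 0)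
  match order with
  | [] => -1
  | j :: _ => if PySem.List.pyGetD row j 0 < 0 then j else -1

-- ===== PRECONDITION & SPEC =====
def Spec_find_permitting_column_py (row : List Int) (out : Int) : Prop := out = find_permitting_column_py_alt row
instance (row : List Int) (out : Int) : Decidable (Spec_find_permitting_column_py row out) := by unfold Spec_find_permitting_column_py; infer_instance

-- ===== CLAIM (what is proved, stated in full; the proofs are below) =====
def Claim_equal_find_permitting_column_py : Prop := ∀ (row : List Int), Dom_find_permitting_column_py row → Spec_find_permitting_column_py row (find_permitting_column_py row)

-- ===== LEMMAS AND PROOFS =====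

-- head of the insertion-sort fold: the stable insert keeps the champion (first index of
-- the minimal key) at the head; the champion evolves by the simple strict-less update.
lemma head_foldl_insertBy (key : Int → Int) (is : List Int) :
    ∀ (j : Int) (t : List Int),
      ((is.foldl (fun acc x => PySem.List.insertBy (fun a b => decide (key a < key b)) x acc)
        (j :: t)).head?)
      = some (is.foldl (fun c i => if key i < key c then i else c) j) := by
  induction is with
  | nil => intro j t; simp
  | cons i is ih =>
    intro j t
    simp only [List.foldl_cons, PySem.List.insertBy]
    by_cases h : key i < key j
    · simp [h, ih]
    · simp [h, ih]

-- A's running-minimum state after processing a suffix of indices, expressed through the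
-- same champion fold: the state is (key c, c) when key c < 0 and (0, -1) otherwise.
lemma A_loop_rel (key : Int → Int) (is : List Int) :
    ∀ c : Int,
      ((is.foldl (fun (st : Int × Int) i => if key i < st.1 then (key i, i) else st)
        (if key c < 0 then (key c, c) else (0, -1))).2)
      = (if key (is.foldl (fun c i => if key i < key c then i else c) c) < 0
         then is.foldl (fun c i => if key i < key c then i else c) c else -1) := by
  induction is with
  | nil => intro c; by_cases h : key c < 0 <;> simp [h]
  | cons i is ih =>
    intro c
    simp only [List.foldl_cons]
    have step : (if key i < (if key c < 0 then ((key c, c) : Int × Int) else (0, -1)).1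
                  then (key i, i)
                  else (if key c < 0 then (key c, c) else (0, -1)))
        = (if key (if key i < key c then i else c) < 0
           then (key (if key i < key c then i else c), if key i < key c then i else c)
           else (0, -1)) := by
      by_cases h1 : key c < 0 <;> by_cases h2 : key i < key c <;>
        simp [h1, h2] <;> omega
    rw [step]
    exact ih (if key i < key c then i else c)

lemma insertBy_nil (bf : Int → Int → Bool) (x : Int) :
    PySem.List.insertBy bf x ([] : List Int) = [x] := by
  simp [PySem.List.insertBy]

-- the whole equivalence, for an arbitrary key function over an index range of length n
lemma main_aux (key : Int → Int) (n : Int) :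
    ((PySem.List.pyRange 0 n 1).foldl
      (fun (st : Int × Int) (i : Int) => if key i < st.1 then (key i, i) else st) (0, -1)).2
    = (match PySem.List.sorted (PySem.List.pyRange 0 n 1) key with
       | [] => (-1 : Int)
       | j :: _ => if key j < 0 then j else -1) := by
  by_cases hn : n ≤ 0
  · rw [PySem.List.pyRange_one_eq_nil hn, PySem.List.sorted_eq_foldl_insertBy]
    simp
  · have hn' : (0 : Int) < n := by omega
    rw [PySem.List.pyRange_one_cons hn', PySem.List.sorted_eq_foldl_insertBy]
    simp only [List.foldl_cons]
    rw [insertBy_nil]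
    have hB := head_foldl_insertBy key (PySem.List.pyRange (0 + 1) n 1) 0 []
    cases ho : ((PySem.List.pyRange (0 + 1) n 1).foldl
        (fun acc x => PySem.List.insertBy (fun a b => decide (key a < key b)) x acc) [0]) with
    | nil => rw [ho] at hB; simp at hB
    | cons j t =>
      rw [ho] at hB
      simp only [List.head?_cons, Option.some.injEq] at hB
      subst hB
      exact A_loop_rel key (PySem.List.pyRange (0 + 1) n 1) 0

-- ===== VERDICT (by name: the statement is the Claim_ definition above) =====
theorem find_permitting_column_py_spec : Claim_equal_find_permitting_column_py := by
  intro row _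
  exact main_aux (fun i => PySem.List.pyGetD row i 0) (PySem.List.len row)
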